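-- pv_equiv track=rewrite | github.com/juggler14/financial_university_python_1_hw | university_1_8.py | task10
-- ===== SOURCE A (Python) =====
-- import copy
--
-- def task10(matrix):
--     m, n = len(matrix), len(matrix[0])
--     h_m, h_n = m//2, n//2
--     result = copy.deepcopy(matrix)
--     for i in range(h_m):
--         for j in range(h_n):
--             result[i][j], result[i+h_m][j+h_n] = result[i+h_m][j+h_n], result[i][j]
--     return result
-- ===== SOURCE B (Python) =====
-- import copy
--
-- def task10(matrix):
--     m, n = len(matrix), len(matrix[0])
--     h_m, h_n = m // 2, n // 2
--
--     def pick(i, j):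
--         if i < h_m and j < h_n:
--             return matrix[i + h_m][j + h_n]
--         if h_m <= i < 2 * h_m and h_n <= j < 2 * h_n:
--             return matrix[i - h_m][j - h_n]
--         return matrix[i][j]
--
--     return [[copy.deepcopy(pick(i, j)) for j in range(len(row))]
--             for i, row in enumerate(matrix)]
-- ===== Notes on version B (the rewrite author's own statement) =====
-- stated objective: alternative
-- what changed: Replaces deepcopy-then-in-place-swap-loop with a single construction pass that builds the result row by row, selecting each cell's source position directly (bottom-right block for the top-left quadrant, top-left block for the bottom-right quadrant, the cell itself elsewhere).
import Mathlib
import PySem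

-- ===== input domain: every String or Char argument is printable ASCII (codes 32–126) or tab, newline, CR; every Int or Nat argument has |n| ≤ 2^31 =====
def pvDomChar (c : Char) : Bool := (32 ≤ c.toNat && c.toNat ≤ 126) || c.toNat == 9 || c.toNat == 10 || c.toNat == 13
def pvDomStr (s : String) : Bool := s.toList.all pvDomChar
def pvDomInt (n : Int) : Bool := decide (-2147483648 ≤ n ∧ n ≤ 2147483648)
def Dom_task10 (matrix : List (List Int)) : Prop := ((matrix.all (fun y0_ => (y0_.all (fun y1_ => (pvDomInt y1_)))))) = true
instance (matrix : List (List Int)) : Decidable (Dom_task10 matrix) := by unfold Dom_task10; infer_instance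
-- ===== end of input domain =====

-- B builds the result in one construction pass that selects each cell's source position,
-- instead of A's deepcopy followed by an in-place swap loop over the top-left quadrant.

-- ===== PORT A =====
-- result[p][q]; the defaults are never reached under Pre_
def pvEntry (mat : List (List Int)) (p q : Nat) : Int := (mat.getD p []).getD q 0

-- result[i][j] = v
def pvSetAt (mat : List (List Int)) (i j : Nat) (v : Int) : List (List Int) :=
  mat.set i ((mat.getD i []).set j v)

def task10 (matrix : List (List Int)) : List (List Int) :=
  let m := matrix.length
  let n := (matrix.headD []).length   -- len(matrix[0]); matrix ≠ [] is in Pre_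
  let hm := m / 2
  let hn := n / 2
  -- result = deepcopy(matrix): for Int matrices deepcopy is the value itself
  (List.range hm).foldl (fun res i =>
    (List.range hn).foldl (fun res j =>
      -- result[i][j], result[i+h_m][j+h_n] = result[i+h_m][j+h_n], result[i][j]
      let a := pvEntry res (i + hm) (j + hn)
      let b := pvEntry res i j
      pvSetAt (pvSetAt res i j a) (i + hm) (j + hn) b) res) matrix

-- ===== PORT B =====
def task10_alt (matrix : List (List Int)) : List (List Int) :=
  let m := matrix.length
  let n := (matrix.headD []).length
  let hm := m / 2
  let hn := n / 2
  matrix.mapIdx (fun i row => row.mapIdx (fun j _ =>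
    if i < hm ∧ j < hn then pvEntry matrix (i + hm) (j + hn)
    else if hm ≤ i ∧ i < 2 * hm ∧ hn ≤ j ∧ j < 2 * hn then pvEntry matrix (i - hm) (j - hn)
    else pvEntry matrix i j))

-- ===== PRECONDITION & SPEC =====
-- Pre_ excludes exactly the inputs where Python A raises IndexError: the empty matrix
-- (matrix[0]) and matrices whose accessed rows are too short for the quadrant swap.
def Pre_task10 (matrix : List (List Int)) : Prop :=
  matrix ≠ [] ∧ ∀ i < matrix.length / 2,
    (matrix.headD []).length / 2 ≤ (matrix.getD i []).length ∧
    2 * ((matrix.headD []).length / 2) ≤ (matrix.getD (i + matrix.length / 2) []).length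
instance (matrix : List (List Int)) : Decidable (Pre_task10 matrix) := by unfold Pre_task10; infer_instance

def pvWitness_task10 : List (List Int) := [[1, 2], [3, 4]]

def Spec_task10 (matrix : List (List Int)) (out : List (List Int)) : Prop := out = task10_alt matrix
instance (matrix : List (List Int)) (out : List (List Int)) : Decidable (Spec_task10 matrix out) := by unfold Spec_task10; infer_instance

-- ===== CLAIM (what is proved, stated in full; the proofs are below) =====
def Claim_equal_task10 : Prop := ∀ (matrix : List (List Int)), Dom_task10 matrix → Pre_task10 matrix → Spec_task10 matrix (task10 matrix)

-- ===== LEMMAS AND PROOFS =====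

-- the swap of one pair of cells, as folded by task10
def pvSwap (hm hn : Nat) (mat : List (List Int)) (x : Nat × Nat) : List (List Int) :=
  pvSetAt (pvSetAt mat x.1 x.2 (pvEntry mat (x.1 + hm) (x.2 + hn)))
    (x.1 + hm) (x.2 + hn) (pvEntry mat x.1 x.2)

def pvFold (hm hn : Nat) (L : List (Nat × Nat)) (mat : List (List Int)) : List (List Int) :=
  L.foldl (pvSwap hm hn) mat

-- selection function describing the fold's result
def pvSel (hm hn : Nat) (L : List (Nat × Nat)) (mat : List (List Int)) (p q : Nat) : Int :=
  if (p, q) ∈ L then pvEntry mat (p + hm) (q + hn)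
  else if hm ≤ p ∧ hn ≤ q ∧ (p - hm, q - hn) ∈ L then pvEntry mat (p - hm) (q - hn)
  else pvEntry mat p q

theorem pvSetAt_length (mat : List (List Int)) (i j : Nat) (v : Int) :
    (pvSetAt mat i j v).length = mat.length := by
  simp [pvSetAt]

theorem pvSetAt_rowlen (mat : List (List Int)) (i j : Nat) (v : Int) (p : Nat) :
    ((pvSetAt mat i j v).getD p []).length = (mat.getD p []).length := by
  by_cases h : i = p
  · subst h
    by_cases hlen : i < mat.length
    · simp [pvSetAt, List.getD, hlen]
    · simp [pvSetAt, List.getD, hlen]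
  · simp [pvSetAt, List.getD, h]

theorem pvSwap_length (hm hn : Nat) (mat : List (List Int)) (x : Nat × Nat) :
    (pvSwap hm hn mat x).length = mat.length := by
  unfold pvSwap; rw [pvSetAt_length, pvSetAt_length]

theorem pvSwap_rowlen (hm hn : Nat) (mat : List (List Int)) (x : Nat × Nat) (p : Nat) :
    ((pvSwap hm hn mat x).getD p []).length = (mat.getD p []).length := by
  unfold pvSwap; rw [pvSetAt_rowlen, pvSetAt_rowlen]

theorem pvFold_length (hm hn : Nat) (L : List (Nat × Nat)) (mat : List (List Int)) :
    (pvFold hm hn L mat).length = mat.length := by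
  induction L generalizing mat with
  | nil => rfl
  | cons x L ih =>
    show (pvFold hm hn L (pvSwap hm hn mat x)).length = mat.length
    rw [ih, pvSwap_length]

theorem pvFold_rowlen (hm hn : Nat) (L : List (Nat × Nat)) (mat : List (List Int)) (p : Nat) :
    ((pvFold hm hn L mat).getD p []).length = ((mat.getD p []) : List Int).length := by
  induction L generalizing mat with
  | nil => rfl
  | cons x L ih =>
    show ((pvFold hm hn L (pvSwap hm hn mat x)).getD p []).length = _
    rw [ih, pvSwap_rowlen]

theorem pvEntry_setAt (mat : List (List Int)) (i j : Nat) (v : Int)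
    (hi : i < mat.length) (hj : j < (mat.getD i []).length) (p q : Nat) :
    pvEntry (pvSetAt mat i j v) p q = if p = i ∧ q = j then v else pvEntry mat p q := by
  unfold pvEntry
  by_cases hp : p = i
  · subst hp
    have hrow : (pvSetAt mat p j v).getD p [] = (mat.getD p []).set j v := by
      simp [pvSetAt, List.getD, hi]
    rw [hrow]
    by_cases hq : q = j
    · subst hq
      rw [if_pos ⟨rfl, rfl⟩, List.getD_eq_getElem?_getD, List.getElem?_set_self hj]
      rfl
    · rw [if_neg (by tauto), List.getD_eq_getElem?_getD,
        List.getElem?_set_ne (fun h : j = q => hq h.symm), ← List.getD_eq_getElem?_getD]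
  · have hrow : (pvSetAt mat i j v).getD p [] = mat.getD p [] := by
      simp only [pvSetAt, List.getD, List.getElem?_set]
      rw [if_neg (fun h : i = p => hp h.symm)]
    rw [hrow, if_neg (by tauto)]

theorem pvEntry_swap (hm hn : Nat) (mat : List (List Int)) (u v : Nat)
    (hu : u + hm < mat.length) (hv : v < (mat.getD u []).length)
    (hv2 : v + hn < (mat.getD (u + hm) []).length) (p q : Nat) :
    pvEntry (pvSwap hm hn mat (u, v)) p q =
      if p = u ∧ q = v then pvEntry mat (u + hm) (v + hn)
      else if p = u + hm ∧ q = v + hn then pvEntry mat u v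
      else pvEntry mat p q := by
  have hu' : u < mat.length := by omega
  have h1 : ∀ p q, pvEntry (pvSetAt mat u v (pvEntry mat (u + hm) (v + hn))) p q =
      if p = u ∧ q = v then pvEntry mat (u + hm) (v + hn) else pvEntry mat p q :=
    fun p q => pvEntry_setAt mat u v _ hu' hv p q
  have hlen : (u + hm) < (pvSetAt mat u v (pvEntry mat (u + hm) (v + hn))).length := by
    rw [pvSetAt_length]; exact hu
  have hlen2 : v + hn <
      ((pvSetAt mat u v (pvEntry mat (u + hm) (v + hn))).getD (u + hm) []).length := by
    rw [pvSetAt_rowlen]; exact hv2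
  have h2 := pvEntry_setAt (pvSetAt mat u v (pvEntry mat (u + hm) (v + hn)))
      (u + hm) (v + hn) (pvEntry mat u v) hlen hlen2 p q
  show pvEntry (pvSetAt (pvSetAt mat u v _) (u + hm) (v + hn) (pvEntry mat u v)) p q = _
  rw [h2, h1]
  by_cases hB : p = u + hm ∧ q = v + hn
  · rw [if_pos hB]
    by_cases hA : p = u ∧ q = v
    · rw [if_pos hA]
      obtain ⟨h3, h4⟩ := hA
      obtain ⟨h5, h6⟩ := hB
      have e1 : hm = 0 := by omega
      have e2 : hn = 0 := by omega
      rw [e1, e2]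
      simp
    · rw [if_neg hA, if_pos hB]
  · rw [if_neg hB]
    by_cases hA : p = u ∧ q = v
    · rw [if_pos hA, if_pos hA]
    · rw [if_neg hA, if_neg hA, if_neg hB]

-- the core invariant: folding disjoint in-range swaps computes the selection function
theorem pvFold_entry (hm hn : Nat) (L : List (Nat × Nat))
    (mat : List (List Int))
    (hL : ∀ x ∈ L, x.1 < hm ∧ x.2 < hn ∧ x.1 + hm < mat.length ∧
          x.2 < (mat.getD x.1 []).length ∧ x.2 + hn < (mat.getD (x.1 + hm) []).length)
    (hnd : L.Nodup) (p q : Nat) :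
    pvEntry (pvFold hm hn L mat) p q = pvSel hm hn L mat p q := by
  induction L generalizing mat with
  | nil => simp [pvFold, pvSel]
  | cons x L ih =>
    obtain ⟨u, v⟩ := x
    obtain ⟨hu1, hv1, hu2, hv2, hv3⟩ := hL (u, v) (List.mem_cons_self)
    have hm0 : 0 < hm := by omega
    have hn0 : 0 < hn := by omega
    have hnotmem : (u, v) ∉ L := (List.nodup_cons.mp hnd).1
    have hndL : L.Nodup := (List.nodup_cons.mp hnd).2
    have hswap := pvEntry_swap hm hn mat u v hu2 hv2 hv3
    have hL' : ∀ x ∈ L, x.1 < hm ∧ x.2 < hn ∧ x.1 + hm < (pvSwap hm hn mat (u, v)).length ∧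
        x.2 < ((pvSwap hm hn mat (u, v)).getD x.1 []).length ∧
        x.2 + hn < ((pvSwap hm hn mat (u, v)).getD (x.1 + hm) []).length := by
      intro y hy
      obtain ⟨a1, a2, a3, a4, a5⟩ := hL y (List.mem_cons_of_mem _ hy)
      rw [pvSwap_length, pvSwap_rowlen, pvSwap_rowlen]
      exact ⟨a1, a2, a3, a4, a5⟩
    have hfold : pvFold hm hn ((u, v) :: L) mat = pvFold hm hn L (pvSwap hm hn mat (u, v)) := rfl
    rw [hfold, ih (pvSwap hm hn mat (u, v)) hL' hndL]
    unfold pvSel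
    by_cases hmem : (p, q) ∈ L
    · obtain ⟨b1, b2, _, _, _⟩ := hL (p, q) (List.mem_cons_of_mem _ hmem)
      have h1 : ¬ (p + hm = u ∧ q + hn = v) := by rintro ⟨h, _⟩; omega
      have h2 : ¬ (p + hm = u + hm ∧ q + hn = v + hn) := by
        rintro ⟨h, h'⟩
        have hp : p = u := by omega
        have hq : q = v := by omega
        exact hnotmem (hp ▸ hq ▸ hmem)
      have hmem' : (p, q) ∈ (u, v) :: L := List.mem_cons_of_mem _ hmem
      rw [if_pos hmem, if_pos hmem', hswap, if_neg h1, if_neg h2]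
    · by_cases hbot : hm ≤ p ∧ hn ≤ q ∧ (p - hm, q - hn) ∈ L
      · obtain ⟨hp1, hq1, hmem2⟩ := hbot
        obtain ⟨b1, b2, _, _, _⟩ := hL (p - hm, q - hn) (List.mem_cons_of_mem _ hmem2)
        have hpq : (p, q) ∉ (u, v) :: L := by
          simp only [List.mem_cons, hmem, or_false]
          intro h
          have : p = u := congrArg Prod.fst h
          omega
        have h1 : ¬ (p - hm = u ∧ q - hn = v) := by
          rintro ⟨h, h'⟩
          exact hnotmem (h ▸ h' ▸ hmem2)
        have h2 : ¬ (p - hm = u + hm ∧ q - hn = v + hn) := by rintro ⟨h, _⟩; omega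
        have hbm : hm ≤ p ∧ hn ≤ q ∧ (p - hm, q - hn) ∈ (u, v) :: L :=
          ⟨hp1, hq1, List.mem_cons_of_mem _ hmem2⟩
        rw [if_neg hmem, if_pos ⟨hp1, hq1, hmem2⟩, if_neg hpq, if_pos hbm, hswap, if_neg h1,
          if_neg h2]
      · by_cases hx : p = u ∧ q = v
        · obtain ⟨rfl, rfl⟩ := hx
          have hmem' : (p, q) ∈ (p, q) :: L := List.mem_cons_self
          rw [if_neg hmem, if_neg hbot, if_pos hmem', hswap]
          simp
        · by_cases hy : p = u + hm ∧ q = v + hn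
          · obtain ⟨rfl, rfl⟩ := hy
            have hpq : ((u + hm, v + hn) : Nat × Nat) ∉ (u, v) :: L := by
              simp only [List.mem_cons, hmem, or_false]
              intro h
              have : u + hm = u := congrArg Prod.fst h
              omega
            have e1 : u + hm - hm = u := by omega
            have e2 : v + hn - hn = v := by omega
            have hbm : hm ≤ u + hm ∧ hn ≤ v + hn ∧
                ((u + hm - hm, v + hn - hn) : Nat × Nat) ∈ (u, v) :: L := by
              refine ⟨by omega, by omega, ?_⟩
              rw [e1, e2]; exact List.mem_cons_self
            rw [if_neg hmem, if_neg hbot, if_neg hpq, if_pos hbm, e1, e2, hswap]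
            have hne1 : ¬ (u + hm = u ∧ v + hn = v) := by rintro ⟨h, _⟩; omega
            rw [if_neg hne1, if_pos ⟨rfl, rfl⟩]
          · have hpq : (p, q) ∉ (u, v) :: L := by
              simp only [List.mem_cons, hmem, or_false]
              intro h
              exact hx ⟨congrArg Prod.fst h, congrArg Prod.snd h⟩
            have hbm : ¬ (hm ≤ p ∧ hn ≤ q ∧ (p - hm, q - hn) ∈ (u, v) :: L) := by
              rintro ⟨c1, c2, c3⟩
              rcases List.mem_cons.mp c3 with h | h
              · have e1 : p - hm = u := congrArg Prod.fst h
                have e2 : q - hn = v := congrArg Prod.snd h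
                exact hy ⟨by omega, by omega⟩
              · exact hbot ⟨c1, c2, h⟩
            rw [if_neg hmem, if_neg hbot, if_neg hpq, if_neg hbm, hswap, if_neg hx, if_neg hy]

-- the pair list actually folded over by task10
def pvPairs (hm hn : Nat) : List (Nat × Nat) :=
  (List.range hm).flatMap (fun i => (List.range hn).map (fun j => (i, j)))

theorem pvPairs_mem (hm hn p q : Nat) : (p, q) ∈ pvPairs hm hn ↔ p < hm ∧ q < hn := by
  simp only [pvPairs, List.mem_flatMap, List.mem_map, List.mem_range, Prod.mk.injEq]
  constructor
  · rintro ⟨i, hi, j, hj, rfl, rfl⟩; exact ⟨hi, hj⟩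
  · rintro ⟨hp, hq⟩; exact ⟨p, hp, q, hq, rfl, rfl⟩

theorem pvPairs_nodup (hm hn : Nat) : (pvPairs hm hn).Nodup := by
  have : pvPairs hm hn = (List.range hm) ×ˢ (List.range hn) := rfl
  rw [this]
  exact List.Nodup.product List.nodup_range List.nodup_range

theorem task10_eq_fold (matrix : List (List Int)) :
    task10 matrix =
      pvFold (matrix.length / 2) ((matrix.headD []).length / 2)
        (pvPairs (matrix.length / 2) ((matrix.headD []).length / 2)) matrix := by
  unfold task10 pvFold pvPairs
  rw [List.foldl_flatMap]
  simp only [List.foldl_map]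
  rfl

theorem pv_getElem?_getD (l : List (List Int)) (p : Nat) (hp : p < l.length) :
    l[p]? = some (l.getD p []) := by
  rw [List.getD_eq_getElem?_getD, List.getElem?_eq_getElem hp]
  rfl

theorem pv_getD_eq_getElem (l : List Int) (q : Nat) (h : q < l.length) :
    l.getD q 0 = l[q] := by
  rw [List.getD_eq_getElem?_getD, List.getElem?_eq_getElem h]
  rfl

theorem alt_length (matrix : List (List Int)) :
    (task10_alt matrix).length = matrix.length := by
  simp [task10_alt]

theorem alt_rowlen (matrix : List (List Int)) (p : Nat) :
    ((task10_alt matrix).getD p []).length = (matrix.getD p []).length := by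
  simp only [task10_alt, List.getD, List.getElem?_mapIdx]
  cases matrix[p]? <;> simp

theorem mapIdx2_entry (mat : List (List Int)) (f : Nat → Nat → Int) (p q : Nat)
    (hp : p < mat.length) (hq : q < (mat.getD p []).length) :
    pvEntry (mat.mapIdx (fun i row => row.mapIdx (fun j _ => f i j))) p q = f p q := by
  have hgd : mat.getD p [] = mat[p] := by
    rw [List.getD_eq_getElem?_getD, List.getElem?_eq_getElem hp]
    rfl
  have hq' : q < mat[p].length := by rw [← hgd]; exact hq
  show ((mat.mapIdx (fun i row => row.mapIdx (fun j _ => f i j)))[p]?.getD [])[q]?.getD 0 = f p q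
  rw [List.getElem?_mapIdx, List.getElem?_eq_getElem hp]
  simp only [Option.map_some, Option.getD_some]
  rw [List.getElem?_mapIdx, List.getElem?_eq_getElem hq']
  rfl

theorem alt_entry (matrix : List (List Int)) (p q : Nat)
    (hp : p < matrix.length) (hq : q < (matrix.getD p []).length) :
    pvEntry (task10_alt matrix) p q =
      pvSel (matrix.length / 2) ((matrix.headD []).length / 2)
        (pvPairs (matrix.length / 2) ((matrix.headD []).length / 2)) matrix p q := by
  have hform : task10_alt matrix = matrix.mapIdx (fun i row => row.mapIdx (fun j _ =>
      if i < matrix.length / 2 ∧ j < (matrix.headD []).length / 2 then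
        pvEntry matrix (i + matrix.length / 2) (j + (matrix.headD []).length / 2)
      else if matrix.length / 2 ≤ i ∧ i < 2 * (matrix.length / 2) ∧
          (matrix.headD []).length / 2 ≤ j ∧ j < 2 * ((matrix.headD []).length / 2) then
        pvEntry matrix (i - matrix.length / 2) (j - (matrix.headD []).length / 2)
      else pvEntry matrix i j)) := rfl
  rw [hform, mapIdx2_entry matrix _ p q hp hq]
  unfold pvSel
  by_cases h1 : p < matrix.length / 2 ∧ q < (matrix.headD []).length / 2
  · rw [if_pos h1, if_pos ((pvPairs_mem _ _ p q).mpr h1)]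
  · rw [if_neg h1, if_neg (fun h => h1 ((pvPairs_mem _ _ p q).mp h))]
    by_cases h2 : matrix.length / 2 ≤ p ∧ p < 2 * (matrix.length / 2) ∧
        (matrix.headD []).length / 2 ≤ q ∧ q < 2 * ((matrix.headD []).length / 2)
    · rw [if_pos h2,
        if_pos ⟨h2.1, h2.2.2.1, (pvPairs_mem _ _ _ _).mpr ⟨by omega, by omega⟩⟩]
    · rw [if_neg h2]
      rw [if_neg]
      rintro ⟨c1, c2, c3⟩
      have := (pvPairs_mem _ _ _ _).mp c3
      exact h2 ⟨c1, by omega, c2, by omega⟩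

-- ===== VERDICT (by name: the statement is the Claim_ definition above) =====
theorem task10_spec : Claim_equal_task10 := by
  intro matrix _ hpre
  obtain ⟨hne, hrows⟩ := hpre
  unfold Spec_task10
  have hL : ∀ x ∈ pvPairs (matrix.length / 2) ((matrix.headD []).length / 2),
      x.1 < matrix.length / 2 ∧ x.2 < (matrix.headD []).length / 2 ∧
      x.1 + matrix.length / 2 < matrix.length ∧
      x.2 < (matrix.getD x.1 []).length ∧
      x.2 + (matrix.headD []).length / 2 <
        (matrix.getD (x.1 + matrix.length / 2) []).length := by
    rintro ⟨i, j⟩ hx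
    dsimp only
    obtain ⟨hi, hj⟩ := (pvPairs_mem _ _ i j).mp hx
    obtain ⟨r1, r2⟩ := hrows i hi
    exact ⟨hi, hj, by omega, by omega, by omega⟩
  have hlenA : (task10 matrix).length = matrix.length := by
    rw [task10_eq_fold, pvFold_length]
  have hrowA : ∀ p, ((task10 matrix).getD p []).length = (matrix.getD p []).length := by
    intro p; rw [task10_eq_fold, pvFold_rowlen]
  have hentA : ∀ p q, pvEntry (task10 matrix) p q =
      pvSel (matrix.length / 2) ((matrix.headD []).length / 2)
        (pvPairs (matrix.length / 2) ((matrix.headD []).length / 2)) matrix p q := by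
    intro p q
    rw [task10_eq_fold]
    exact pvFold_entry _ _ _ matrix hL (pvPairs_nodup _ _) p q
  apply List.ext_getElem?
  intro p
  by_cases hp : p < matrix.length
  · rw [pv_getElem?_getD _ p (by rw [hlenA]; exact hp),
      pv_getElem?_getD _ p (by rw [alt_length]; exact hp)]
    congr 1
    apply List.ext_getElem?
    intro q
    by_cases hq : q < (matrix.getD p []).length
    · have hqa : q < ((task10 matrix).getD p []).length := by rw [hrowA]; exact hq
      have hqb : q < ((task10_alt matrix).getD p []).length := by rw [alt_rowlen]; exact hq
      rw [List.getElem?_eq_getElem hqa, List.getElem?_eq_getElem hqb]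
      have e1 : ((task10 matrix).getD p [])[q]'hqa = pvEntry (task10 matrix) p q := by
        unfold pvEntry
        exact (pv_getD_eq_getElem _ q hqa).symm
      have e2 : ((task10_alt matrix).getD p [])[q]'hqb = pvEntry (task10_alt matrix) p q := by
        unfold pvEntry
        exact (pv_getD_eq_getElem _ q hqb).symm
      rw [Option.some_inj, e1, e2, hentA, alt_entry matrix p q hp hq]
    · rw [List.getElem?_eq_none (by rw [hrowA]; omega),
        List.getElem?_eq_none (by rw [alt_rowlen]; omega)]
  · rw [List.getElem?_eq_none (by rw [hlenA]; omega),
      List.getElem?_eq_none (by rw [alt_length]; omega)]
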